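-- pv_equiv track=rewrite | github.com/genericuser101/trajectory-kit | src/trajectory_kit/mae_parse.py | _tokenise_mae_line
-- ===== SOURCE A (Python) =====
-- def _tokenise_mae_line(line: str) -> list[str]:
--
--     '''
--     Tokenise a single MAE data-row line, respecting double-quoted strings.
--
--     Rules
--     -----
--     - Quoted strings are returned with their quotes stripped.
--     - Unquoted tokens are whitespace-delimited.
--     - The leading row-index integer is included as the first token.
--
--     Parameters
--     ----------
--     line : str
--         A raw line from a MAE data block (after the ::: separator).
--
--     Returns
--     -------
--     list[str]
--         List of token strings.
--     '''
--
--     tokens: list[str] = []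
--     i = 0
--     n = len(line)
--
--     while i < n:
--         # skip whitespace
--         while i < n and line[i] in ' \t\r\n':
--             i += 1
--         if i >= n:
--             break
--
--         if line[i] == '"':
--             # quoted string: advance past opening quote
--             i += 1
--             start = i
--             while i < n and line[i] != '"':
--                 i += 1
--             tokens.append(line[start:i])
--             i += 1  # skip closing quote
--         else:
--             start = i
--             while i < n and line[i] not in ' \t\r\n':
--                 i += 1
--             tokens.append(line[start:i])
--
--     return tokens
-- ===== SOURCE B (Python) =====
-- def _tokenise_mae_line(line: str) -> list[str]:
--     """Single-pass character state machine instead of index/slice scanning."""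
--     tokens: list[str] = []
--     cur = None          # current token buffer, None when between tokens
--     in_quote = False
--     for ch in line:
--         if cur is None:
--             if ch in ' \t\r\n':
--                 continue
--             if ch == '"':
--                 cur, in_quote = '', True
--             else:
--                 cur, in_quote = ch, False
--         elif in_quote:
--             if ch == '"':
--                 tokens.append(cur)
--                 cur = None
--             else:
--                 cur += ch
--         else:
--             if ch in ' \t\r\n':
--                 tokens.append(cur)
--                 cur = None
--             else:
--                 cur += ch
--     if cur is not None:
--         tokens.append(cur)
--     return tokens
-- ===== Notes on version B (the rewrite author's own statement) =====
-- stated objective: alternative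
-- what changed: Replaced the index-based nested while loops with slicing by a single-pass per-character state machine maintaining a current-token buffer and an in-quote flag.
import Mathlib
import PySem

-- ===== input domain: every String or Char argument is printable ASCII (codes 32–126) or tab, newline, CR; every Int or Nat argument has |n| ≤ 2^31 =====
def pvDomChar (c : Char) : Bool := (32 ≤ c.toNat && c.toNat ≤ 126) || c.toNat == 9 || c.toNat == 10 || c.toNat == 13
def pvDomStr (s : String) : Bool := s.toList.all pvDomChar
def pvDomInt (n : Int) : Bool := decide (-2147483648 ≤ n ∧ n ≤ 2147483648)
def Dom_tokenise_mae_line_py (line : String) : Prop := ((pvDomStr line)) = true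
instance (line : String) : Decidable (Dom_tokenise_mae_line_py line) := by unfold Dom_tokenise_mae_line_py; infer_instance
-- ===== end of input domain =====

-- B replaces A's index/slice nested-while tokeniser by a single-pass per-character state
-- machine (buffer + in_quote flag); same cost, different decomposition ("alternative").
-- ===== PORT A =====
-- A scans with an index and nested while loops over the string; ported over List Char:
-- the whitespace-skip while loop is the leading `isWS` recursion step, the inner scan
-- loops (`while … != '"'` / `while … not in ws`) become takeWhile/dropWhile of the same
-- predicate, and `line[start:i]` is exactly the scanned prefix.
def pvIsWS (c : Char) : Bool := c == ' ' || c == '\t' || c == '\r' || c == '\n'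

def pvTokA : List Char → List String
  | [] => []
  | c :: cs =>
    if hw : pvIsWS c then pvTokA cs
    else if c = '"' then
      String.mk (cs.takeWhile (fun x => !(x == '"'))) ::
        pvTokA ((cs.dropWhile (fun x => !(x == '"'))).drop 1)
    else
      String.mk ((c :: cs).takeWhile (fun x => !pvIsWS x)) ::
        pvTokA ((c :: cs).dropWhile (fun x => !pvIsWS x))
  termination_by cs => cs.length
  decreasing_by
    · simp
    · have := List.length_dropWhile_le (fun x => !(x == '"')) cs
      simp only [List.length_drop, List.length_cons]; omega
    · have hb : (!pvIsWS c) = true := by simp [hw]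
      have := List.length_dropWhile_le (fun x => !pvIsWS x) cs
      simp only [List.dropWhile_cons, hb, if_pos, List.length_cons]; omega

def tokenise_mae_line_py (line : String) : List String := pvTokA line.toList

-- ===== PORT B =====
-- B is a single-pass state machine: state = (tokens so far, current buffer or none, in_quote).
def pvStepB (st : List String × Option (List Char) × Bool) (c : Char) :
    List String × Option (List Char) × Bool :=
  match st with
  | (toks, none, _) =>
    if pvIsWS c then (toks, none, false)
    else if c = '"' then (toks, some [], true)
    else (toks, some [c], false)
  | (toks, some cur, true) =>
    if c = '"' then (toks ++ [String.mk cur], none, false)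
    else (toks, some (cur ++ [c]), true)
  | (toks, some cur, false) =>
    if pvIsWS c then (toks ++ [String.mk cur], none, false)
    else (toks, some (cur ++ [c]), false)

-- final flush of the buffer (trailing token / unterminated quote)
def pvFlushB (st : List String × Option (List Char) × Bool) : List String :=
  match st with
  | (toks, none, _) => toks
  | (toks, some cur, _) => toks ++ [String.mk cur]

def tokenise_mae_line_py_alt (line : String) : List String :=
  pvFlushB (line.toList.foldl pvStepB ([], none, false))

-- ===== PRECONDITION & SPEC =====
def Spec_tokenise_mae_line_py (line : String) (out : List String) : Prop := out = tokenise_mae_line_py_alt line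
instance (line : String) (out : List String) : Decidable (Spec_tokenise_mae_line_py line out) := by unfold Spec_tokenise_mae_line_py; infer_instance

-- ===== CLAIM (what is proved, stated in full; the proofs are below) =====
def Claim_equal_tokenise_mae_line_py : Prop := ∀ (line : String), Dom_tokenise_mae_line_py line → Spec_tokenise_mae_line_py line (tokenise_mae_line_py line)

-- ===== LEMMAS AND PROOFS =====
theorem pvTokA_ws {c : Char} {cs : List Char} (hw : pvIsWS c = true) :
    pvTokA (c :: cs) = pvTokA cs := by
  rw [pvTokA]
  simp [hw]
-- Invariant of B's fold, for the three kinds of state, related to A's recursion.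
theorem pvB_inv (cs : List Char) : ∀ (toks : List String) (cur : List Char),
    (pvFlushB (cs.foldl pvStepB (toks, none, false)) = toks ++ pvTokA cs) ∧
    (pvFlushB (cs.foldl pvStepB (toks, some cur, true)) =
      toks ++ [String.mk (cur ++ cs.takeWhile (fun x => !(x == '"')))] ++
        pvTokA ((cs.dropWhile (fun x => !(x == '"'))).drop 1)) ∧
    (pvFlushB (cs.foldl pvStepB (toks, some cur, false)) =
      toks ++ [String.mk (cur ++ cs.takeWhile (fun x => !pvIsWS x))] ++
        pvTokA (cs.dropWhile (fun x => !pvIsWS x))) := by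
  induction cs with
  | nil => intro toks cur; simp [pvFlushB, pvTokA]
  | cons c cs ih =>
    intro toks cur
    have hqws : pvIsWS '"' = false := by decide
    refine ⟨?_, ?_, ?_⟩
    · by_cases hw : pvIsWS c
      · rw [List.foldl_cons]
        simp only [pvStepB, hw, if_true, ite_true]
        rw [(ih toks cur).1, pvTokA_ws hw]
      · by_cases hq : c = '"'
        · subst hq
          rw [List.foldl_cons]
          simp only [pvStepB, hqws, Bool.false_eq_true, ite_false, ite_true]
          rw [(ih toks []).2.1]
          conv_rhs => rw [pvTokA]
          simp [hqws, List.drop_one]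
        · rw [List.foldl_cons]
          simp only [pvStepB, hw, hq, Bool.false_eq_true, ite_false]
          rw [(ih toks [c]).2.2]
          conv_rhs => rw [pvTokA]
          have hb : (!pvIsWS c) = true := by simp [hw]
          simp [hw, hq, List.takeWhile_cons, List.dropWhile_cons, hb]
    · by_cases hq : c = '"'
      · subst hq
        rw [List.foldl_cons]
        simp only [pvStepB, ite_true]
        rw [(ih (toks ++ [String.mk cur]) cur).1]
        simp [List.takeWhile_cons, List.dropWhile_cons, pvTokA]
      · rw [List.foldl_cons]
        have hb : (!(c == '"')) = true := by simp [hq]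
        simp only [pvStepB, hq, ite_false]
        rw [(ih toks (cur ++ [c])).2.1]
        simp [List.takeWhile_cons, List.dropWhile_cons, hb]
    · by_cases hw : pvIsWS c
      · rw [List.foldl_cons]
        simp only [pvStepB, hw, ite_true]
        rw [(ih (toks ++ [String.mk cur]) cur).1]
        simp [List.takeWhile_cons, List.dropWhile_cons, hw, pvTokA_ws hw]
      · rw [List.foldl_cons]
        have hb : (!pvIsWS c) = true := by simp [hw]
        simp only [pvStepB, hw, Bool.false_eq_true, ite_false]
        rw [(ih toks (cur ++ [c])).2.2]
        simp [List.takeWhile_cons, List.dropWhile_cons, hb]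

-- ===== VERDICT (by name: the statement is the Claim_ definition above) =====
theorem tokenise_mae_line_py_spec : Claim_equal_tokenise_mae_line_py := by
  intro line _
  unfold Spec_tokenise_mae_line_py tokenise_mae_line_py tokenise_mae_line_py_alt
  exact ((pvB_inv line.toList [] []).1).symm
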